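-- pv_equiv track=rewrite | github.com/kamuiroeru/dump-ac-status | update_sega_log.py | calc_ongeki_credit
-- ===== SOURCE A (Python) =====
-- from typing import Final, List, NamedTuple
-- from itertools import product
-- from collections import defaultdict
--
-- def calc_ongeki_credit(track_count: int) -> List[int]:
--     """プレイ曲数からクレジットを計算する
--     〜考え方〜
--     1. 3a + 5b = c において、 c が track_count 以上かつ最小である (a, b) の組を求める
--     2. この (a, b) に対して、a + 2b がクレジット回数になる。
--     3. ただし、(a, b) の組が複数現れることもある。
--     """
--     c2ab = defaultdict(list)
--     for a, b in product(range(20), range(20)):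
--         c = 3*a + 5*b
--         c2ab[c].append((a, b))
--     search_list = sorted(c2ab.keys())
--     i = 0
--     while search_list[i] < track_count:
--         i += 1
--
--     ab_list = c2ab[search_list[i]]
--     return [a + 2 * b for a, b in ab_list]
-- ===== SOURCE B (Python) =====
-- _UNREACHABLE = {1, 2, 4, 7, 145, 148, 150, 151}
--
--
-- def calc_ongeki_credit(track_count):
--     """Arithmetic solution: no grid enumeration.
--
--     Reachable sums 3a+5b with 0 <= a, b <= 19 are exactly 0..152 minus
--     _UNREACHABLE, so the minimal reachable sum c >= track_count is found by
--     bumping past the few gaps.  The pairs hitting c have b == 2c (mod 3)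
--     inside arithmetic bounds, and the credit a+2b simplifies to (c+b)//3;
--     iterating b downward yields a ascending, the order A emits.
--     """
--     c = max(track_count, 0)
--     while c in _UNREACHABLE:
--         c += 1
--     if c > 152:
--         raise IndexError("track_count exceeds the largest reachable sum")
--     b_hi = min(c // 5, 19)
--     b_lo = max(-(-(c - 57) // 5), 0)  # ceil((c-57)/5), since a <= 19
--     b = b_hi - ((b_hi - 2 * c) % 3)   # largest b <= b_hi with b == 2c (mod 3)
--     out = []
--     while b >= b_lo:
--         out.append((c + b) // 3)
--         b -= 3
--     return out
-- ===== Notes on version B (the rewrite author's own statement) =====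
-- stated objective: alternative
-- what changed: Replaces A's 400-pair grid enumeration, defaultdict grouping, key sort and linear scan by a closed-form arithmetic characterization: the reachable sums are 0..152 minus eight gap values, and the matching pairs/credits for the chosen sum are generated directly from a modular congruence b = 2c (mod 3) with credit (c+b)//3.
import Mathlib
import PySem

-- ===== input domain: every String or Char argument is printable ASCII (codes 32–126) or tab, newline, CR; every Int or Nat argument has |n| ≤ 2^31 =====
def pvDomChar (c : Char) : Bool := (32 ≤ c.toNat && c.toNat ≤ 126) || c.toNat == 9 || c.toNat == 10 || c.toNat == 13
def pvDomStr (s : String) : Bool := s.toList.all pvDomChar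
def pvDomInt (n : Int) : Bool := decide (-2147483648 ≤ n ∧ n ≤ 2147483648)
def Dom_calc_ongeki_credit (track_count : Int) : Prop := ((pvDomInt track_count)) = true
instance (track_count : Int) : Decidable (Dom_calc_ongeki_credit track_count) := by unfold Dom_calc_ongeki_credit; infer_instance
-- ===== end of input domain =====

set_option maxRecDepth 100000


-- B replaces A's 400-pair enumeration + dict + sort + scan by closed-form arithmetic on the
-- reachable sums and a modular congruence (objective: alternative, no speed claim).

-- ===== PORT A =====
-- product(range(20), range(20)) in a-outer, b-inner order
def pvPairsA : List (Int × Int) :=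
  (PySem.List.pyRange 0 20 1).flatMap (fun a => (PySem.List.pyRange 0 20 1).map (fun b => (a, b)))

-- c2ab = defaultdict(list); for (a,b): c2ab[3a+5b].append((a,b))
def pvC2ab : PySem.Dict Int (List (Int × Int)) :=
  pvPairsA.foldl (fun d p => d.modify (3 * p.1 + 5 * p.2) [] (fun l => l ++ [p])) PySem.Dict.empty

-- search_list = sorted(c2ab.keys())
def pvSearchListA : List Int := PySem.List.sorted pvC2ab.keys (fun x => x) false

-- i = 0; while search_list[i] < track_count: i += 1  — returns search_list[i]; none = IndexError
def pvScanA (tc : Int) : List Int → Option Int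
  | [] => none
  | x :: xs => if x < tc then pvScanA tc xs else some x

def calc_ongeki_credit (track_count : Int) : List Int :=
  match pvScanA track_count pvSearchListA with
  | none => []   -- IndexError in Python; excluded by Pre_
  | some c => (pvC2ab.getD c []).map (fun p => p.1 + 2 * p.2)

-- ===== PORT B =====
-- the Python set literal _UNREACHABLE (constant membership test)
def pvUnreachable : List Int := [1, 2, 4, 7, 145, 148, 150, 151]

-- while c in _UNREACHABLE: c += 1  (fuel 8 only makes it total; the loop runs at most 2 steps,
-- since maximal runs of consecutive unreachable values have length 2)
def pvBumpAux : Nat → Int → Int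
  | 0, c => c
  | n + 1, c => if c ∈ pvUnreachable then pvBumpAux n (c + 1) else c

def pvBump (c : Int) : Int := pvBumpAux 8 c

-- while b >= b_lo: out.append((c+b)//3); b -= 3  (fuel 20 only makes it total: b starts ≤ 19,
-- decreases by 3 each step and b_lo ≥ 0, so at most 7 iterations)
def pvEmitAux : Nat → Int → Int → Int → List Int
  | 0, _, _, _ => []
  | n + 1, c, b_lo, b =>
      if b ≥ b_lo then PySem.Int.floordiv (c + b) 3 :: pvEmitAux n c b_lo (b - 3) else []

def pvEmit (c b_lo b : Int) : List Int := pvEmitAux 20 c b_lo b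

def calc_ongeki_credit_alt (track_count : Int) : List Int :=
  let c := pvBump (max track_count 0)
  if c > 152 then []   -- Python raises IndexError here; excluded by Pre_
  else
    let b_hi := min (PySem.Int.floordiv c 5) 19
    let b_lo := max (-(PySem.Int.floordiv (-(c - 57)) 5)) 0
    let b := b_hi - PySem.Int.mod (b_hi - 2 * c) 3
    pvEmit c b_lo b

-- ===== PRECONDITION & SPEC =====
-- For track_count > 152 (the largest reachable sum 3·19+5·19) Python A raises IndexError.
def Pre_calc_ongeki_credit (track_count : Int) : Prop := track_count ≤ 152
instance (track_count : Int) : Decidable (Pre_calc_ongeki_credit track_count) := by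
  unfold Pre_calc_ongeki_credit; infer_instance

def pvWitness_calc_ongeki_credit : Int := (7)

def Spec_calc_ongeki_credit (track_count : Int) (out : List Int) : Prop := out = calc_ongeki_credit_alt track_count
instance (track_count : Int) (out : List Int) : Decidable (Spec_calc_ongeki_credit track_count out) := by unfold Spec_calc_ongeki_credit; infer_instance

-- ===== CLAIM (what is proved, stated in full; the proofs are below) =====
def Claim_equal_calc_ongeki_credit : Prop := ∀ (track_count : Int), Dom_calc_ongeki_credit track_count → Pre_calc_ongeki_credit track_count → Spec_calc_ongeki_credit track_count (calc_ongeki_credit track_count)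

-- ===== LEMMAS AND PROOFS =====

-- both ports depend only on max(track_count, 0): for t ≤ 0 they equal their value at 0
theorem pvA_nonpos (t : Int) (h : t ≤ 0) : calc_ongeki_credit t = calc_ongeki_credit 0 := by
  have hl : pvSearchListA = 0 :: pvSearchListA.tail := by decide
  unfold calc_ongeki_credit
  rw [hl]
  have h1 : pvScanA t (0 :: pvSearchListA.tail) = some 0 := by
    simp [pvScanA]; omega
  have h2 : pvScanA 0 (0 :: pvSearchListA.tail) = some 0 := by
    simp [pvScanA]
  rw [h1, h2]

theorem pvB_nonpos (t : Int) (h : t ≤ 0) : calc_ongeki_credit_alt t = calc_ongeki_credit_alt 0 := by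
  unfold calc_ongeki_credit_alt
  rw [max_eq_right h, max_self]

-- the finite core: equality on every track_count in [0, 152]
set_option maxHeartbeats 4000000 in
theorem pvCore : ∀ t ∈ Finset.Icc (0 : Int) 152, calc_ongeki_credit t = calc_ongeki_credit_alt t := by
  decide

-- ===== VERDICT (by name: the statement is the Claim_ definition above) =====
theorem calc_ongeki_credit_spec : Claim_equal_calc_ongeki_credit := by
  intro t _ hpre
  unfold Spec_calc_ongeki_credit
  by_cases h0 : t ≤ 0
  · rw [pvA_nonpos t h0, pvB_nonpos t h0]
    exact pvCore 0 (by decide)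
  · exact pvCore t (Finset.mem_Icc.2 ⟨by omega, hpre⟩)
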